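-- pv_equiv track=rewrite | github.com/seungcle/problems | 프로그래머스/5/214292. 재밌는 레이싱 경기장 설계하기/재밌는 레이싱 경기장 설계하기.py | solution
-- ===== SOURCE A (Python) =====
-- def solution(heights):
--     heights.sort()
--     n = len(heights)
--     half = n // 2
--
--     diffs = []
--     for i in range(n - half):
--         diffs.append(heights[i + half] - heights[i])
--
--     diffs.sort()
--
--     if n % 2 == 0:
--         return diffs[0]
--     else:
--         return diffs[1]
-- ===== SOURCE B (Python) =====
-- def solution(heights):
--     # one pass over the half-apart gaps, tracking the two smallest
--     heights.sort()
--     n = len(heights)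
--     half = n // 2
--     m1 = m2 = None  # smallest and second-smallest gap seen so far
--     for i in range(n - half):
--         g = heights[i + half] - heights[i]
--         if m1 is None or g < m1:
--             m1, m2 = g, m1
--         elif m2 is None or g < m2:
--             m2 = g
--     return m1 if n % 2 == 0 else m2
-- ===== Notes on version B (the rewrite author's own statement) =====
-- stated objective: alternative
-- what changed: Instead of materializing the list of half-apart gaps and sorting it a second time, B selects the needed order statistic (smallest gap for even n, second-smallest for odd n) in a single pass with a two-value tracker; Pre_ excludes lists of length < 2, where A raises IndexError (B has no int to return there).
-- outside the precondition, e.g. on solution([0]): A raises IndexError, B returns None; on solution([1]): A raises IndexError, B returns None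
import Mathlib
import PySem

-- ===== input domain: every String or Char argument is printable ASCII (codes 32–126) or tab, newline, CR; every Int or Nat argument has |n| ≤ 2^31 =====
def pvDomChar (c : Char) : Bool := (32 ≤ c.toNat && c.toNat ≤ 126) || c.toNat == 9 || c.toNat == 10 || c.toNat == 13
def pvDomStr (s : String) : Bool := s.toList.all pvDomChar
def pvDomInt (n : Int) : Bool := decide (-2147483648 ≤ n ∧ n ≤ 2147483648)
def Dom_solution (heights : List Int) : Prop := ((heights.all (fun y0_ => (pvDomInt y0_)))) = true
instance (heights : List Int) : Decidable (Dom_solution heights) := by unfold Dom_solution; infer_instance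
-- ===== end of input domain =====

-- B replaces A's gap list + second sort with a single pass tracking the two smallest gaps
-- (alternative decomposition; same overall cost). Both Pythons sort 'heights' in place;
-- the equivalence proved here is about the return value only.

-- ===== PORT A =====
def solution (heights : List Int) : Int :=
  let s := PySem.List.sorted heights (fun x => x) false
  let n : Int := (s.length : Int)
  let half := PySem.Int.floordiv n 2
  let diffs := (PySem.List.pyRange 0 (n - half) 1).foldl
      (fun acc i => acc ++ [PySem.List.pyGetD s (i + half) 0 - PySem.List.pyGetD s i 0]) []
  let ds := PySem.List.sorted diffs (fun x => x) false
  if PySem.Int.mod n 2 = 0 then (PySem.List.pyGet? ds 0).getD 0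
  else (PySem.List.pyGet? ds 1).getD 0

-- ===== PORT B =====
-- the body of B's loop: update the (smallest, second-smallest) tracker with gap g
def altStep (st : Option Int × Option Int) (g : Int) : Option Int × Option Int :=
  match st.1 with
  | none => (some g, st.1)
  | some a =>
    if g < a then (some g, st.1)
    else
      match st.2 with
      | none => (st.1, some g)
      | some b => if g < b then (st.1, some g) else st

def solution_alt (heights : List Int) : Int :=
  let s := PySem.List.sorted heights (fun x => x) false
  let n : Int := (s.length : Int)
  let half := PySem.Int.floordiv n 2
  let st := (PySem.List.pyRange 0 (n - half) 1).foldl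
      (fun st i => altStep st (PySem.List.pyGetD s (i + half) 0 - PySem.List.pyGetD s i 0))
      (none, none)
  -- Python returns m1 / m2, which is None only outside Pre_; .getD 0 stands for that None
  if PySem.Int.mod n 2 = 0 then st.1.getD 0 else st.2.getD 0

-- ===== PRECONDITION & SPEC =====
-- Pre_ excludes lists of length 0 and 1: there A raises IndexError (diffs[0] resp. diffs[1]
-- does not exist), and B's tracker has no second value, so B returns None (not an int).
def Pre_solution (heights : List Int) : Prop := 2 ≤ heights.length
instance (heights : List Int) : Decidable (Pre_solution heights) := by unfold Pre_solution; infer_instance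
def pvWitness_solution : List Int := ([1, 4, 2, 9])
def Spec_solution (heights : List Int) (out : Int) : Prop := out = solution_alt heights
instance (heights : List Int) (out : Int) : Decidable (Spec_solution heights out) := by unfold Spec_solution; infer_instance

-- ===== CLAIM (what is proved, stated in full; the proofs are below) =====
def Claim_equal_solution : Prop := ∀ (heights : List Int), Dom_solution heights → Pre_solution heights → Spec_solution heights (solution heights)

-- ===== LEMMAS AND PROOFS =====

-- PySem's stable sort on Int with the identity key is insertion sort.
theorem pysorted_eq_insertionSort (d : List Int) :
    PySem.List.sorted d (fun x => x) false = List.insertionSort (· ≤ ·) d := by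
  apply PySem.List.sorted_id_eq_of_perm_of_pairwise
  · exact List.perm_insertionSort _ d
  · exact List.pairwise_insertionSort _ d

-- one tracker step = orderedInsert into a sorted list, seen through its first two elements
theorem altStep_orderedInsert (s : List Int) (hs : s.Pairwise (· ≤ ·)) (g : Int) :
    altStep (s[0]?, s[1]?) g
      = ((List.orderedInsert (· ≤ ·) g s)[0]?, (List.orderedInsert (· ≤ ·) g s)[1]?) := by
  match s with
  | [] => simp [altStep, List.orderedInsert]
  | [a] =>
    simp only [altStep, List.orderedInsert]
    split_ifs <;> simp <;> omega
  | a :: b :: t =>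
    have hab : a ≤ b := (List.pairwise_cons.mp hs).1 b (by simp)
    simp only [altStep, List.orderedInsert]
    split_ifs <;> simp <;> intros <;> split_ifs <;> simp_all <;> omega

-- the fold over a gap list computes the first two elements of the sorted gap list
theorem foldl_altStep_eq (d : List Int) :
    d.foldl altStep (none, none)
      = ((List.insertionSort (· ≤ ·) d)[0]?, (List.insertionSort (· ≤ ·) d)[1]?) := by
  induction d using List.reverseRecOn with
  | nil => simp
  | append_singleton d x ih =>
    have hperm : (List.insertionSort (· ≤ ·) (d ++ [x])).Perm
        (List.orderedInsert (· ≤ ·) x (List.insertionSort (· ≤ ·) d)) :=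
      ((List.perm_insertionSort _ _).trans
        (List.perm_append_comm.trans
          (((List.perm_insertionSort _ d).symm.cons x).trans
            (List.perm_orderedInsert _ x _).symm)))
    have hsort : List.insertionSort (· ≤ ·) (d ++ [x])
        = List.orderedInsert (· ≤ ·) x (List.insertionSort (· ≤ ·) d) :=
      hperm.eq_of_pairwise (fun a b _ _ h1 h2 => le_antisymm h1 h2)
        (List.pairwise_insertionSort _ _)
        ((List.pairwise_insertionSort _ d).orderedInsert x _)
    rw [List.foldl_append, ih, hsort]
    exact altStep_orderedInsert _ (List.pairwise_insertionSort _ d) x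

-- B's fold over the index range equals the fold over the mapped gap list
theorem foldl_altStep_map (r : List Int) (g : Int → Int) :
    r.foldl (fun st i => altStep st (g i)) (none, none)
      = ((List.insertionSort (· ≤ ·) (r.map g))[0]?, (List.insertionSort (· ≤ ·) (r.map g))[1]?) := by
  rw [← foldl_altStep_eq, List.foldl_map]

theorem pyGet?_one (l : List Int) : PySem.List.pyGet? l 1 = l[1]? := by
  simp [PySem.List.pyGet?_of_nonneg]

-- ===== VERDICT (by name: the statement is the Claim_ definition above) =====
theorem solution_spec : Claim_equal_solution := by
  intro heights _ _
  show solution heights = solution_alt heights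
  unfold solution solution_alt
  simp only [PySem.List.foldl_append_singleton_eq_map, List.nil_append,
    foldl_altStep_map, pysorted_eq_insertionSort]
  split_ifs
  · simp [PySem.List.pyGet?_zero]
  · rw [pyGet?_one]
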